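-- pv_equiv track=rewrite | github.com/GayanRuchiranga/ChemGuide | Chem_Guide_BackEnd/identify_molecule.py | cyanide
-- ===== SOURCE A (Python) =====
-- def cyanide(input):
--     carbon = 0
--     hydrogen = 0
--     nitrogen =0
--     cyanide_val = 0
--
--     for i in input:
--         if i == "C" or i == "c":
--             carbon += 1
--         elif i == "H" or i == "h":
--             hydrogen += 1
--         elif i.isdigit():
--             hydrogen += int(i)-1
--         elif i=="N" or i=="n":
--             nitrogen += 1
--         else:
--             cyanide_val = 1
--
--     if cyanide_val != 1 and hydrogen == ((carbon * 2)-1) and nitrogen==1: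
--         return "0"
--     else:
--         return "1"
-- ===== SOURCE B (Python) =====
-- def cyanide(input):
--     carbon = input.count("C") + input.count("c")
--     nitrogen = input.count("N") + input.count("n")
--     hydrogen = (input.count("H") + input.count("h")
--                 + sum(int(c) - 1 for c in input if c.isdigit()))
--     invalid = any(c not in "CcHhNn0123456789" for c in input)
--     if not invalid and hydrogen == carbon * 2 - 1 and nitrogen == 1:
--         return "0"
--     return "1"
-- ===== Notes on version B (the rewrite author's own statement) =====
-- stated objective: simpler
-- what changed: Replaced the single stateful loop with per-character branches by independent whole-string counts (str.count per atom letter, a sum over digits, an any() validity test) combined in the final predicate.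
import Mathlib
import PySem

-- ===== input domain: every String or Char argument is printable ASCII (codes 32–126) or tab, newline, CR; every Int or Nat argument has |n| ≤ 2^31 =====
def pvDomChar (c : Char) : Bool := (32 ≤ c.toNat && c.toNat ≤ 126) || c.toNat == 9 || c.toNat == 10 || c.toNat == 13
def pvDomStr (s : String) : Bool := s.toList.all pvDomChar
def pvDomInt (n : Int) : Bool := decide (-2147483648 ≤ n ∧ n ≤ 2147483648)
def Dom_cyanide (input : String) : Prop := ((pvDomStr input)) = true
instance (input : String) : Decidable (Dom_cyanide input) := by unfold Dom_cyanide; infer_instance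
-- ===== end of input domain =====

-- B replaces A's single stateful per-character-branch loop by independent whole-string
-- counts combined in the final predicate (objective: simpler).


-- ===== PORT A =====
-- state: (carbon, hydrogen, nitrogen, cyanide_val); one branch per character, exactly A's order.
-- `i.isDigit` is exact for Python's str.isdigit on the ASCII domain.
def cyanideStep (st : Int × Int × Int × Int) (i : Char) : Int × Int × Int × Int :=
  if i = 'C' ∨ i = 'c' then (st.1 + 1, st.2.1, st.2.2.1, st.2.2.2)
  else if i = 'H' ∨ i = 'h' then (st.1, st.2.1 + 1, st.2.2.1, st.2.2.2)
  else if i.isDigit then (st.1, st.2.1 + ((i.toNat : Int) - 48) - 1, st.2.2.1, st.2.2.2)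
  else if i = 'N' ∨ i = 'n' then (st.1, st.2.1, st.2.2.1 + 1, st.2.2.2)
  else (st.1, st.2.1, st.2.2.1, 1)

def cyanide (input : String) : String :=
  let st := input.toList.foldl cyanideStep (0, 0, 0, 0)
  if st.2.2.2 ≠ 1 ∧ st.2.1 = st.1 * 2 - 1 ∧ st.2.2.1 = 1 then "0" else "1"

-- ===== PORT B =====
def cyanideAllowed (c : Char) : Bool := c ∈ "CcHhNn0123456789".toList

def cyanide_alt (input : String) : String :=
  let l := input.toList
  let carbon : Int := l.count 'C' + l.count 'c'
  let nitrogen : Int := l.count 'N' + l.count 'n'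
  let hydrogen : Int := (l.count 'H' : Int) + l.count 'h' +
    ((l.filter Char.isDigit).map (fun c => ((c.toNat : Int) - 48) - 1)).sum
  let invalid := l.any (fun c => ! cyanideAllowed c)
  if invalid = false ∧ hydrogen = carbon * 2 - 1 ∧ nitrogen = 1 then "0" else "1"

-- ===== PRECONDITION & SPEC =====
def Spec_cyanide (input : String) (out : String) : Prop := out = cyanide_alt input
instance (input : String) (out : String) : Decidable (Spec_cyanide input out) := by unfold Spec_cyanide; infer_instance

-- ===== CLAIM (what is proved, stated in full; the proofs are below) =====
def Claim_equal_cyanide : Prop := ∀ (input : String), Dom_cyanide input → Spec_cyanide input (cyanide input)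

-- ===== LEMMAS AND PROOFS =====
lemma allowed_chars : "CcHhNn0123456789".toList =
    ['C','c','H','h','N','n','0','1','2','3','4','5','6','7','8','9'] := by decide

lemma allowed_of_digit (x : Char) (h : x.isDigit = true) : cyanideAllowed x = true := by
  have h1 : 48 ≤ x.toNat ∧ x.toNat ≤ 57 := by
    simp only [Char.isDigit, Bool.and_eq_true, decide_eq_true_eq, ge_iff_le] at h
    exact ⟨UInt32.le_iff_toNat_le.mp h.1, UInt32.le_iff_toNat_le.mp h.2⟩
  have hx : Char.ofNat x.toNat = x := Char.ofNat_toNat x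
  simp only [cyanideAllowed, allowed_chars]
  obtain ⟨ha, hb⟩ := h1
  interval_cases hk : x.toNat <;> rw [← hx] <;> decide

lemma digit_of_allowed (x : Char) (hmem : x ∈ "CcHhNn0123456789".toList)
    (hC : x ≠ 'C') (hc : x ≠ 'c') (hH : x ≠ 'H') (hh : x ≠ 'h') (hN : x ≠ 'N') (hn : x ≠ 'n') :
    x.isDigit = true := by
  rw [allowed_chars] at hmem
  simp only [List.mem_cons, List.not_mem_nil, or_false] at hmem
  rcases hmem with h|h|h|h|h|h|h|h|h|h|h|h|h|h|h|h <;> subst h <;> first | decide | simp_all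
lemma cyanideFold_eq (l : List Char) (c h n v : Int) :
    l.foldl cyanideStep (c, h, n, v) =
      (c + ((l.count 'C' : Int) + l.count 'c'),
       h + ((l.count 'H' : Int) + l.count 'h') +
         ((l.filter Char.isDigit).map (fun x => ((x.toNat : Int) - 48) - 1)).sum,
       n + ((l.count 'N' : Int) + l.count 'n'),
       if l.any (fun x => ! cyanideAllowed x) then 1 else v) := by
  induction l generalizing c h n v with
  | nil => simp
  | cons x l ih =>
    simp only [List.foldl_cons, cyanideStep]
    by_cases hC : x = 'C' ∨ x = 'c'
    · rcases hC with h' | h' <;> subst h' <;>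
        simp [ih, List.any_cons, cyanideAllowed, Prod.ext_iff] <;> omega
    · simp only [if_neg hC]
      by_cases hH : x = 'H' ∨ x = 'h'
      · rcases hH with h' | h' <;> subst h' <;>
          simp [ih, List.any_cons, cyanideAllowed, Prod.ext_iff] <;> omega
      · simp only [if_neg hH]
        have hxC : x ≠ 'C' := fun e => hC (Or.inl e)
        have hxc : x ≠ 'c' := fun e => hC (Or.inr e)
        have hxH : x ≠ 'H' := fun e => hH (Or.inl e)
        have hxh : x ≠ 'h' := fun e => hH (Or.inr e)
        by_cases hD : x.isDigit
        · have ha : cyanideAllowed x = true := allowed_of_digit x hD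
          have hxN : x ≠ 'N' := by intro e; subst e; exact absurd hD (by decide)
          have hxn : x ≠ 'n' := by intro e; subst e; exact absurd hD (by decide)
          simp [hD, ih, List.any_cons, ha, hxC, hxc, hxH, hxh, hxN, hxn, Prod.ext_iff]
          omega
        · simp only [if_neg hD]
          by_cases hN : x = 'N' ∨ x = 'n'
          · rcases hN with h' | h' <;> subst h' <;>
              simp [ih, List.any_cons, cyanideAllowed, Prod.ext_iff] <;> omega
          · have hxN : x ≠ 'N' := fun e => hN (Or.inl e)
            have hxn : x ≠ 'n' := fun e => hN (Or.inr e)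
            have ha : cyanideAllowed x = false := by
              simp only [cyanideAllowed, Bool.eq_false_iff]
              intro hmem
              exact hD (digit_of_allowed x (of_decide_eq_true hmem) hxC hxc hxH hxh hxN hxn)
            simp [ih, List.any_cons, ha, hD, hxC, hxc, hxH, hxh, hxN, hxn]

-- ===== VERDICT (by name: the statement is the Claim_ definition above) =====
theorem cyanide_spec : Claim_equal_cyanide := by
  intro input _
  unfold Spec_cyanide cyanide cyanide_alt
  rw [cyanideFold_eq]
  by_cases hinv : input.toList.any (fun x => ! cyanideAllowed x) = true
  · simp [hinv]
  · simp only [Bool.not_eq_true] at hinv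
    simp [hinv]
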